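-- pv_equiv track=rewrite | github.com/thisishaykins/HackerRank | deleteProducts.py | deleteProducts
-- ===== SOURCE A (Python) =====
-- from collections import defaultdict
--
-- def deleteProducts(ids, m):
--     # unique id count
--     idsCount = defaultdict(int)
--
--     for id in ids:
--         idsCount[id] += 1
--
--     # create sorted list of tuples with id and count
--     leastToMost = list(sorted(idsCount.items(), key=lambda item: item[1]))
--
--     # while there is still deletions allowed
--     while m > 0:
--         # if deletion is more than or equal to the least count id
--         if m >= leastToMost[0][1]:
--             # decrease the available deletion left
--             # remove that id count pair from list
--             m -= leastToMost[0][1]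
--             leastToMost.pop(0)
--         else:
--             # leave the loop if deletion amount is less than id count
--             # because there will still be remaining unique id left
--             break
--
--     return len(leastToMost)
-- ===== SOURCE B (Python) =====
-- from collections import defaultdict
--
-- def deleteProducts(ids, m):
--     # bucket the ids by frequency; no sort: walk frequencies 1..n and delete
--     # whole groups of equally-frequent ids at once via integer division
--     freq = defaultdict(int)
--     for i in ids:
--         freq[i] += 1
--     buckets = defaultdict(int)
--     for c in freq.values():
--         buckets[c] += 1
--     remaining = len(freq)
--     n = len(ids)
--     c = 1
--     while m > 0 and c <= n:
--         k = buckets[c]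
--         if k:
--             take = min(k, m // c)
--             remaining -= take
--             m -= take * c
--             if take < k:
--                 break
--         c += 1
--     return remaining
-- ===== Notes on version B (the rewrite author's own statement) =====
-- stated objective: faster
-- what changed: B never sorts: it builds a frequency-of-frequencies histogram and walks count values 1..n once, deleting each whole group of equally-frequent ids in one integer-division step, instead of A's sort of (id,count) pairs followed by repeated pop(0).
import Mathlib
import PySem

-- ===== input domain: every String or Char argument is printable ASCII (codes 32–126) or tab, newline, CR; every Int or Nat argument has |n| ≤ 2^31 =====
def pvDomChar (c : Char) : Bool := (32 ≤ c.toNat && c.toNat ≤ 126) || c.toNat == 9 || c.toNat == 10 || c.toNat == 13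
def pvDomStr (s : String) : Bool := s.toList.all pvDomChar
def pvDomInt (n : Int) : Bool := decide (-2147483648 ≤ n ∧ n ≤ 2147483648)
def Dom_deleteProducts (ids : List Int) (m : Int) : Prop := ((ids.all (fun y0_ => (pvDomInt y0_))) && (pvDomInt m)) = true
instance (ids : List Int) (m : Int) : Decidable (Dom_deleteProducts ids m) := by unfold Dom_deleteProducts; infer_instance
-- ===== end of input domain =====

-- B replaces A's sort + repeated pop(0) with a frequency-of-frequencies histogram walked
-- once, deleting each group of equally-frequent ids in one division step (no sort at all).

-- ===== PORT A =====
-- the while loop: pops the head while m ≥ its count; on IndexError (empty list, m > 0) Python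
-- raises — that input is outside Pre_ below; the port returns 0 there.
def loopA : List (Int × Int) → Int → Int
  | [], _ => 0
  | (k, c) :: rest, m =>
    if m > 0 then
      if m ≥ c then loopA rest (m - c)
      else (((k, c) :: rest).length : Int)
    else (((k, c) :: rest).length : Int)

def deleteProducts (ids : List Int) (m : Int) : Int :=
  let idsCount : PySem.Dict Int Int :=
    ids.foldl (fun d id => d.modify id 0 (· + 1)) PySem.Dict.empty
  let leastToMost := PySem.List.sorted idsCount.items (fun item => item.2) false
  loopA leastToMost m

-- ===== PORT B =====
-- the while loop of Source B: fuel counts the remaining values of c (c runs 1..n)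
def loopB (buckets : PySem.Dict Int Int) : Nat → Int → Int → Int → Int
  | 0, _, _, remaining => remaining
  | fuel + 1, c, m, remaining =>
    if m > 0 then
      let k := buckets.getD c 0
      if k ≠ 0 then
        let take := min k (PySem.Int.floordiv m c)
        if take < k then remaining - take
        else loopB buckets fuel (c + 1) (m - take * c) (remaining - take)
      else loopB buckets fuel (c + 1) m remaining
    else remaining

def deleteProducts_alt (ids : List Int) (m : Int) : Int :=
  let freq : PySem.Dict Int Int :=
    ids.foldl (fun d i => d.modify i 0 (· + 1)) PySem.Dict.empty
  let buckets : PySem.Dict Int Int :=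
    freq.values.foldl (fun d c => d.modify c 0 (· + 1)) PySem.Dict.empty
  loopB buckets ids.length 1 m (freq.size : Int)

-- ===== PRECONDITION & SPEC =====
-- A raises IndexError when m > len(ids) (the loop empties the list with deletions left over)
def Pre_deleteProducts (ids : List Int) (m : Int) : Prop := m ≤ (ids.length : Int)
instance (ids : List Int) (m : Int) : Decidable (Pre_deleteProducts ids m) := by
  unfold Pre_deleteProducts; infer_instance
def pvWitness_deleteProducts : List Int × Int := ([1, 1, 2, 3], 2)

def Spec_deleteProducts (ids : List Int) (m : Int) (out : Int) : Prop := out = deleteProducts_alt ids m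
instance (ids : List Int) (m : Int) (out : Int) : Decidable (Spec_deleteProducts ids m out) := by unfold Spec_deleteProducts; infer_instance

-- ===== CLAIM (what is proved, stated in full; the proofs are below) =====
def Claim_equal_deleteProducts : Prop := ∀ (ids : List Int) (m : Int), Dom_deleteProducts ids m → Pre_deleteProducts ids m → Spec_deleteProducts ids m (deleteProducts ids m)

-- ===== LEMMAS AND PROOFS =====

-- A's algorithm reduced to a scan of the sorted count values (intermediate form shared by
-- neither port; both are rewritten to it)
def scanCounts : List Int → Int → Int → Int
  | [], _, remaining => remaining
  | c :: rest, m, remaining =>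
    if m < c then remaining else scanCounts rest (m - c) (remaining - 1)

-- the stable sort of the (id,count) pairs keyed by count, projected to counts, is the sorted counts
lemma map_snd_sorted_snd (l : List (Int × Int)) :
    (PySem.List.sorted l (fun p => p.2) false).map Prod.snd
      = PySem.List.sorted (l.map Prod.snd) (fun v => v) false := by
  apply PySem.List.eq_of_perm_of_pairwise_le_of_injective (fun v : Int => v)
    (fun _ _ h => h)
  · exact ((PySem.List.sorted_perm l (fun p => p.2) false).map Prod.snd).trans
      (PySem.List.sorted_perm (l.map Prod.snd) (fun v => v) false).symm
  · exact PySem.List.sorted_map_key_pairwise l (fun p => p.2)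
  · exact PySem.List.sorted_pairwise (l.map Prod.snd) (fun v => v)

-- A's pop(0) loop is the scan over the projected counts when every count is positive
lemma loopA_eq_scan (l : List (Int × Int)) (m : Int)
    (h : ∀ p ∈ l, 1 ≤ p.2) :
    loopA l m = scanCounts (l.map Prod.snd) m (l.length : Int) := by
  induction l generalizing m with
  | nil => simp [loopA, scanCounts]
  | cons p rest ih =>
    obtain ⟨k, c⟩ := p
    have hc : 1 ≤ c := h (k, c) (by simp)
    have hrest : ∀ q ∈ rest, 1 ≤ q.2 := fun q hq => h q (by simp [hq])
    simp only [loopA, scanCounts, List.map_cons]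
    by_cases hm : m < c
    · have hnot : ¬ m ≥ c := by omega
      rcases lt_or_ge (0 : Int) m with h0 | h0
      · simp [if_neg hnot, if_pos hm]
      · simp [if_neg (by omega : ¬ m > 0), if_pos hm]
    · have h0 : m > 0 := by omega
      rw [if_pos h0, if_pos (by omega : m ≥ c), if_neg (by omega : ¬ m < c),
        ih (m - c) hrest]
      congr 1
      simp

lemma counts_pos (ids : List Int) :
    ∀ p ∈ (PySem.Dict.counter ids).items, 1 ≤ p.2 := by
  intro p hp
  rw [PySem.Dict.items_counter] at hp
  obtain ⟨k, hk, rfl⟩ := List.mem_map.mp hp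
  have : k ∈ ids := (PySem.Set.mem_ofList ids k).mp hk
  have := List.count_pos_iff.mpr this
  simp only
  omega

-- a sorted list whose elements are all ≥ c starts with its block of c's
lemma block_decomp (c : Int) (vals : List Int) (h1 : vals.Pairwise (· ≤ ·))
    (h2 : ∀ v ∈ vals, c ≤ v) :
    ∃ rest, vals = List.replicate (vals.count c) c ++ rest ∧
      rest.Pairwise (· ≤ ·) ∧ ∀ v ∈ rest, c < v := by
  induction vals with
  | nil => exact ⟨[], by simp⟩
  | cons v tl ih =>
    have hcv : c ≤ v := h2 v (by simp)
    have htl1 : tl.Pairwise (· ≤ ·) := h1.of_cons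
    by_cases hvc : v = c
    · subst hvc
      have htl2 : ∀ x ∈ tl, v ≤ x := fun x hx => h2 x (by simp [hx])
      obtain ⟨rest, heq, hp, hgt⟩ := ih htl1 htl2
      refine ⟨rest, ?_, hp, hgt⟩
      simp only [List.count_cons_self, List.replicate_succ, List.cons_append]
      rw [← heq]
    · have hvgt : c < v := lt_of_le_of_ne hcv (fun h => hvc h.symm)
      have hall : ∀ x ∈ v :: tl, c < x := by
        intro x hx
        rcases List.mem_cons.mp hx with rfl | hx
        · exact hvgt
        · exact lt_of_lt_of_le hvgt (List.rel_of_pairwise_cons h1 hx)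
      have hcnt : (v :: tl).count c = 0 := by
        rw [List.count_eq_zero]
        intro hmem
        exact absurd rfl (ne_of_gt (hall c hmem))
      exact ⟨v :: tl, by simp [hcnt], h1, hall⟩

-- scanning a block of k equal counts c consumes min(k, m // c) of them in one step
lemma scan_replicate (k : Nat) (c m r : Int) (rest : List Int)
    (hc : 1 ≤ c) (hm : 0 ≤ m) :
    scanCounts (List.replicate k c ++ rest) m r =
      if PySem.Int.floordiv m c < (k : Int) then r - PySem.Int.floordiv m c
      else scanCounts rest (m - k * c) (r - k) := by
  induction k generalizing m r with
  | zero =>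
    have hq : 0 ≤ PySem.Int.floordiv m c :=
      (PySem.Int.le_floordiv_iff_mul_le (by omega)).mpr (by omega)
    simp only [List.replicate_zero, List.nil_append, Nat.cast_zero]
    rw [if_neg (by omega)]
    simp
  | succ k ih =>
    have hq0 : 0 ≤ PySem.Int.floordiv m c :=
      (PySem.Int.le_floordiv_iff_mul_le (by omega)).mpr (by omega)
    simp only [List.replicate_succ, List.cons_append, scanCounts]
    by_cases hmc : m < c
    · have hq1 : PySem.Int.floordiv m c < 1 :=
        (PySem.Int.floordiv_lt_iff_lt_mul (by omega)).mpr (by omega)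
      rw [if_pos hmc, if_pos (by push_cast; omega)]
      omega
    · rw [not_lt] at hmc
      have hql : 1 ≤ PySem.Int.floordiv m c :=
        (PySem.Int.le_floordiv_iff_mul_le (by omega)).mpr (by omega)
      -- floordiv (m - c) c = floordiv m c - 1
      have hlow : PySem.Int.floordiv m c * c ≤ m :=
        (PySem.Int.le_floordiv_iff_mul_le (by omega)).mp le_rfl
      have hhigh : m < (PySem.Int.floordiv m c + 1) * c :=
        (PySem.Int.floordiv_lt_iff_lt_mul (by omega)).mp (by omega)
      have hstep : PySem.Int.floordiv (m - c) c = PySem.Int.floordiv m c - 1 := by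
        rw [PySem.Int.floordiv_eq_iff_of_pos (by omega)]
        constructor <;> nlinarith
      rw [if_neg (by omega), ih (m - c) (r - 1) (by omega), hstep]
      by_cases hlt : PySem.Int.floordiv m c - 1 < (k : Int)
      · rw [if_pos hlt, if_pos (by push_cast; omega)]
        omega
      · rw [if_neg hlt, if_neg (by push_cast; omega)]
        congr 1 <;> push_cast <;> ring

-- B's bucket walk equals the scan of any sorted list with the same counts
lemma loopB_eq_scan (buckets : PySem.Dict Int Int) (fuel : Nat) :
    ∀ (c m r : Int) (vals : List Int),
      vals.Pairwise (· ≤ ·) → (∀ v ∈ vals, c ≤ v) → (∀ v ∈ vals, v < c + fuel) →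
      1 ≤ c → (∀ j, c ≤ j → buckets.getD j 0 = (vals.count j : Int)) →
      loopB buckets fuel c m r = scanCounts vals m r := by
  induction fuel with
  | zero =>
    intro c m r vals _ h2 h3 _ _
    have : vals = [] := by
      cases vals with
      | nil => rfl
      | cons v tl =>
        exact absurd (h3 v (by simp)) (by have := h2 v (by simp); push_cast; omega)
    subst this
    simp [loopB, scanCounts]
  | succ fuel ih =>
    intro c m r vals h1 h2 h3 hc h5
    simp only [loopB]
    by_cases hm : m > 0
    · rw [if_pos hm]
      have hk : buckets.getD c 0 = (vals.count c : Int) := h5 c le_rfl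
      by_cases hkz : buckets.getD c 0 ≠ 0
      · rw [if_pos hkz]
        have hkpos : 1 ≤ vals.count c := by
          by_contra h
          exact hkz (by rw [hk]; omega)
        obtain ⟨rest, heq, hrp, hrgt⟩ := block_decomp c vals h1 h2
        have hrest_count : ∀ j, c + 1 ≤ j → rest.count j = vals.count j := by
          intro j hj
          have hne : (c == j) = false := by simp; omega
          rw [heq, List.count_append, List.count_replicate, hne]
          simp
        rw [heq, scan_replicate (vals.count c) c m r rest hc (by omega)]
        set q := PySem.Int.floordiv m c with hqdef
        by_cases hlt : min (buckets.getD c 0) q < buckets.getD c 0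
        · rw [if_pos hlt]
          have : q < (vals.count c : Int) := by rw [hk] at hlt; omega
          rw [if_pos this]
          rw [hk] at hlt ⊢
          omega
        · rw [if_neg hlt]
          have hqge : (vals.count c : Int) ≤ q := by rw [hk] at hlt; omega
          rw [if_neg (by omega)]
          have hmin : min (buckets.getD c 0) q = (vals.count c : Int) := by
            rw [hk]; omega
          rw [hmin]
          exact ih (c + 1) (m - (vals.count c : Int) * c) (r - (vals.count c : Int)) rest
            hrp (fun v hv => by have := hrgt v hv; omega)
            (fun v hv => by
              have hb := h3 v (by rw [heq]; exact List.mem_append_right _ hv)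
              push_cast at hb ⊢; omega)
            (by omega)
            (fun j hj => by rw [h5 j (by omega), hrest_count j hj])
      · rw [if_neg hkz]
        have hcnt0 : vals.count c = 0 := by
          have h0 := not_not.mp hkz
          rw [hk] at h0
          exact_mod_cast h0
        have hall : ∀ v ∈ vals, c + 1 ≤ v := by
          intro v hv
          have := h2 v hv
          rcases eq_or_lt_of_le this with rfl | h
          · exact absurd hv (List.count_eq_zero.mp hcnt0)
          · omega
        exact ih (c + 1) m r vals h1 hall
          (fun v hv => by have := h3 v hv; push_cast at this ⊢; omega) (by omega)
          (fun j hj => h5 j (by omega))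
    · rw [if_neg hm]
      cases vals with
      | nil => simp [scanCounts]
      | cons v tl =>
        have : m < v := by have := h2 v (by simp); omega
        simp [scanCounts, if_pos this]

-- both ports reduced to the common scan form
theorem deleteProducts_eq (ids : List Int) (m : Int) :
    deleteProducts ids m = deleteProducts_alt ids m := by
  show loopA (PySem.List.sorted
      (ids.foldl (fun d id => d.modify id 0 (· + 1)) PySem.Dict.empty).items
      (fun item => item.2) false) m
    = loopB ((PySem.Dict.counter ids).values.foldl
        (fun d c => d.modify c 0 (· + 1)) PySem.Dict.empty) ids.length 1 m
        ((PySem.Dict.counter ids).size : Int)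
  rw [← PySem.Dict.counter_eq_foldl]
  set freq := PySem.Dict.counter ids with hfreq
  set svals := PySem.List.sorted freq.values (fun v => v) false with hsvals
  -- A side: loopA on the sorted pairs = scan on the sorted count values
  have hA : loopA (PySem.List.sorted freq.items (fun item => item.2) false) m
      = scanCounts svals m (svals.length : Int) := by
    rw [loopA_eq_scan _ m (fun p hp => counts_pos ids p
      ((PySem.List.mem_sorted freq.items (fun item => item.2) false p).mp hp))]
    rw [map_snd_sorted_snd]
    have hv : freq.values = freq.items.map Prod.snd := rfl
    rw [hsvals, hv]
    congr 1
    rw [← map_snd_sorted_snd]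
    simp [PySem.List.length_sorted]
  rw [hA]
  -- B side: the bucket walk = the same scan
  have hperm : svals.Perm freq.values := PySem.List.sorted_perm _ _ _
  have hpos : ∀ v ∈ svals, 1 ≤ v := by
    intro v hv
    have hv' : v ∈ freq.values := hperm.mem_iff.mp hv
    obtain ⟨p, hp, rfl⟩ := List.mem_map.mp hv'
    exact counts_pos ids p hp
  have hbound : ∀ v ∈ svals, v < 1 + (ids.length : Int) := by
    intro v hv
    have hv' : v ∈ (PySem.Dict.counter ids).items.map Prod.snd := hperm.mem_iff.mp hv
    rw [PySem.Dict.items_counter] at hv'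
    simp only [List.map_map, List.mem_map, Function.comp] at hv'
    obtain ⟨k, _, rfl⟩ := hv'
    have := List.count_le_length (l := ids) (a := k)
    omega
  have hcounts : ∀ j : Int, (1 : Int) ≤ j →
      (freq.values.foldl (fun d c => d.modify c 0 (· + 1)) PySem.Dict.empty).getD j 0
        = (svals.count j : Int) := by
    intro j _
    rw [← PySem.Dict.counter_eq_foldl, PySem.Dict.getD_counter,
      hperm.count_eq j]
  have hlen : ((freq.size : Nat) : Int) = (svals.length : Int) := by
    have : svals.length = freq.values.length := hperm.length_eq
    have hv : freq.values = freq.items.map Prod.snd := rfl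
    simp [this, hv, PySem.Dict.size]
  rw [← hlen] at *
  exact (loopB_eq_scan _ ids.length 1 m (freq.size : Int) svals
    (PySem.List.sorted_pairwise _ _) hpos hbound le_rfl hcounts).symm

-- ===== VERDICT (by name: the statement is the Claim_ definition above) =====
theorem deleteProducts_spec : Claim_equal_deleteProducts := by
  intro ids m _ _
  exact deleteProducts_eq ids m
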